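-- pv_equiv track=rewrite | github.com/lWolvesl/leetcode-py | 24/06/LCP61.py | temperatureTrend
-- ===== SOURCE A (Python) =====
-- from typing import List
--
-- def temperatureTrend(temperatureA: List[int], temperatureB: List[int]) -> int:
--     def getTrend(x: int, y: int) -> int:
--         if x == y:
--             return 0
--         return -1 if x < y else 1
--
--     ans = count = 0
--     for i in range(1, len(temperatureA)):
--         a = getTrend(temperatureA[i - 1], temperatureA[i])
--         b = getTrend(temperatureB[i - 1], temperatureB[i])
--         if a == b:
--             count += 1
--             ans = max(ans, count)
--         else:
--             count = 0
--     return ans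
-- ===== SOURCE B (Python) =====
-- def temperatureTrend(temperatureA, temperatureB):
--     def sgn(x, y):
--         return (x > y) - (x < y)
--     bits = ''.join(
--         '1' if sgn(temperatureA[i - 1], temperatureA[i]) == sgn(temperatureB[i - 1], temperatureB[i]) else '0'
--         for i in range(1, len(temperatureA)))
--     return max(len(run) for run in bits.split('0'))
-- ===== Notes on version B (the rewrite author's own statement) =====
-- stated objective: alternative
-- what changed: A fuses matching, counting and the running maximum into one stateful loop; B first builds the table of per-step trend matches (using the same range(1,len(A)) indexing) and then obtains the answer as the longest all-match segment by splitting the table at the mismatches.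
-- outside the precondition, e.g. on temperatureTrend([1, 2, 3], [1, 2]): A raises IndexError, B raises IndexError
import Mathlib
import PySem

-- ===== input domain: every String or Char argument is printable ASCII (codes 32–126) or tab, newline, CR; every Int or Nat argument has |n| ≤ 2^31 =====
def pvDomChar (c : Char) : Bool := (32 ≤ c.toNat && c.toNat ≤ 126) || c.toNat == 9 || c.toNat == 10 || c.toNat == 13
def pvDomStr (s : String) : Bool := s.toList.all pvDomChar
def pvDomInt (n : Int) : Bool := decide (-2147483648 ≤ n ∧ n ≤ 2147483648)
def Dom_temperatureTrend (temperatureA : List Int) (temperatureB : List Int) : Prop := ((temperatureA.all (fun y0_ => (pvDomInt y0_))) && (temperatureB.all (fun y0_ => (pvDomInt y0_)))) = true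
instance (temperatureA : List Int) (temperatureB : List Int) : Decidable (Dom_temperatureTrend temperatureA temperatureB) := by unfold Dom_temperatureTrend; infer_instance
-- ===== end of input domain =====

-- B restates A as two phases: build the per-step trend-match table, then take the longest
-- all-match segment by splitting at mismatches (objective: alternative decomposition, same O(n) cost).


-- ===== PORT A =====
-- A: fused single pass keeping a running count and a running maximum.
def getTrend (x : Int) (y : Int) : Int :=
  if x = y then 0 else if x < y then -1 else 1

def temperatureTrend (temperatureA : List Int) (temperatureB : List Int) : Int :=
  ((PySem.List.pyRange 1 (temperatureA.length : Int) 1).foldl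
    (fun (s : Int × Int) (i : Int) =>
      let a := getTrend ((PySem.List.pyGet? temperatureA (i - 1)).getD 0) ((PySem.List.pyGet? temperatureA i).getD 0)
      let b := getTrend ((PySem.List.pyGet? temperatureB (i - 1)).getD 0) ((PySem.List.pyGet? temperatureB i).getD 0)
      if a = b then (max s.1 (s.2 + 1), s.2 + 1) else (s.1, 0))
    (0, 0)).1

-- ===== PORT B =====
-- B: build the table of per-step trend matches, then take the longest run of
-- matches by splitting at the mismatches. (Source B's '0'/'1' string is the List Bool
-- here; split('0') segment lengths are splitRuns.)
def sgnPair (x : Int) (y : Int) : Int :=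
  (if x > y then (1 : Int) else 0) - (if x < y then (1 : Int) else 0)

def matchesOf (temperatureA : List Int) (temperatureB : List Int) : List Bool :=
  (PySem.List.pyRange 1 (temperatureA.length : Int) 1).map (fun i =>
    sgnPair ((PySem.List.pyGet? temperatureA (i - 1)).getD 0) ((PySem.List.pyGet? temperatureA i).getD 0)
      == sgnPair ((PySem.List.pyGet? temperatureB (i - 1)).getD 0) ((PySem.List.pyGet? temperatureB i).getD 0))

-- lengths of the segments obtained by splitting at the `false`s (like "bits".split('0'))
def splitRuns : List Bool → List Int
  | [] => [0]
  | true :: r =>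
      match splitRuns r with
      | h :: t => (h + 1) :: t
      | [] => [1]
  | false :: r => 0 :: splitRuns r

def temperatureTrend_alt (temperatureA : List Int) (temperatureB : List Int) : Int :=
  (splitRuns (matchesOf temperatureA temperatureB)).foldl max 0

-- ===== PRECONDITION & SPEC =====
-- Pre_ excludes exactly the inputs where the Python A raises IndexError:
-- temperatureB shorter than temperatureA with at least one loop iteration.
def Pre_temperatureTrend (temperatureA : List Int) (temperatureB : List Int) : Prop :=
  temperatureA.length ≤ 1 ∨ temperatureA.length ≤ temperatureB.length
instance (temperatureA : List Int) (temperatureB : List Int) : Decidable (Pre_temperatureTrend temperatureA temperatureB) := by unfold Pre_temperatureTrend; infer_instance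

def pvWitness_temperatureTrend : List Int × List Int := ([1, 2, 2, 0], [5, 6, 6, 9])

def Spec_temperatureTrend (temperatureA : List Int) (temperatureB : List Int) (out : Int) : Prop := out = temperatureTrend_alt temperatureA temperatureB
instance (temperatureA : List Int) (temperatureB : List Int) (out : Int) : Decidable (Spec_temperatureTrend temperatureA temperatureB out) := by unfold Spec_temperatureTrend; infer_instance

-- ===== CLAIM (what is proved, stated in full; the proofs are below) =====
def Claim_equal_temperatureTrend : Prop := ∀ (temperatureA : List Int) (temperatureB : List Int), Dom_temperatureTrend temperatureA temperatureB → Pre_temperatureTrend temperatureA temperatureB → Spec_temperatureTrend temperatureA temperatureB (temperatureTrend temperatureA temperatureB)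

-- ===== LEMMAS AND PROOFS =====

theorem getTrend_eq_sgnPair (x y : Int) : getTrend x y = sgnPair x y := by
  unfold getTrend sgnPair; split_ifs <;> omega

def stepB (s : Int × Int) (m : Bool) : Int × Int :=
  if m then (max s.1 (s.2 + 1), s.2 + 1) else (s.1, 0)

def consAdd (c : Int) : List Int → List Int
  | [] => [c]
  | h :: t => (h + c) :: t

theorem splitRuns_shape (ms : List Bool) : ∃ h t, splitRuns ms = h :: t ∧ 0 ≤ h := by
  induction ms with
  | nil => exact ⟨0, [], rfl, le_refl 0⟩
  | cons m r ih =>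
    obtain ⟨h, t, hr, hh⟩ := ih
    cases m with
    | true => exact ⟨h + 1, t, by simp [splitRuns, hr], by omega⟩
    | false => exact ⟨0, splitRuns r, rfl, le_refl 0⟩

theorem le_foldl_max (l : List Int) (a : Int) : a ≤ l.foldl max a := by
  induction l generalizing a with
  | nil => exact le_refl a
  | cons x l ih => exact le_trans (le_max_left a x) (ih (max a x))

theorem foldl_max_init (l : List Int) (a b : Int) :
    l.foldl max (max a b) = max a (l.foldl max b) := by
  induction l generalizing b with
  | nil => rfl
  | cons x l ih =>
    show l.foldl max (max (max a b) x) = max a (l.foldl max (max b x))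
    rw [max_assoc, ih]

theorem foldl_stepB_eq (ms : List Bool) (ans count : Int)
    (h0 : 0 ≤ count) (hc : count ≤ ans) :
    (ms.foldl stepB (ans, count)).1 = max ans ((consAdd count (splitRuns ms)).foldl max 0) := by
  induction ms generalizing ans count with
  | nil =>
    show ans = max ans (List.foldl max 0 (consAdd count [0]))
    simp only [consAdd, List.foldl]
    omega
  | cons m r ih =>
    obtain ⟨h, t, hr, hh⟩ := splitRuns_shape r
    cases m with
    | true =>
      show (r.foldl stepB (max ans (count + 1), count + 1)).1
          = max ans ((consAdd count (splitRuns (true :: r))).foldl max 0)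
      rw [ih (max ans (count + 1)) (count + 1) (by omega) (le_max_right _ _)]
      have hsr : splitRuns (true :: r) = (h + 1) :: t := by simp [splitRuns, hr]
      rw [hsr, hr]
      show max (max ans (count + 1)) (List.foldl max 0 ((h + (count + 1)) :: t))
          = max ans (List.foldl max 0 ((h + 1 + count) :: t))
      have he : h + (count + 1) = h + 1 + count := by ring
      rw [he]
      have hX : count + 1 ≤ List.foldl max 0 ((h + 1 + count) :: t) := by
        have := le_foldl_max t (max 0 (h + 1 + count))
        have : max 0 (h + 1 + count) ≤ List.foldl max 0 ((h + 1 + count) :: t) := this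
        omega
      rw [max_assoc, max_eq_right hX]
    | false =>
      show (r.foldl stepB (ans, 0)).1
          = max ans ((consAdd count (splitRuns (false :: r))).foldl max 0)
      rw [ih ans 0 (le_refl 0) (by omega)]
      have hsr : splitRuns (false :: r) = 0 :: splitRuns r := rfl
      rw [hsr, hr]
      show max ans (List.foldl max 0 ((h + 0) :: t))
          = max ans (List.foldl max 0 ((0 + count) :: h :: t))
      have h1 : List.foldl max 0 ((0 + count) :: h :: t)
          = List.foldl max (max 0 count) (h :: t) := by
        simp [List.foldl]
      have h2 : max 0 count = max count 0 := max_comm 0 count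
      rw [h1, h2, foldl_max_init (h :: t) count 0]
      have h3 : h + 0 = h := by ring
      rw [h3]
      rw [← max_assoc, max_eq_left hc]

theorem foldl_body_eq (temperatureA temperatureB : List Int) :
    temperatureTrend temperatureA temperatureB
      = ((matchesOf temperatureA temperatureB).foldl stepB (0, 0)).1 := by
  unfold temperatureTrend matchesOf
  rw [List.foldl_map]
  have hb : (fun (s : Int × Int) (i : Int) =>
      stepB s
        (sgnPair ((PySem.List.pyGet? temperatureA (i - 1)).getD 0) ((PySem.List.pyGet? temperatureA i).getD 0) ==
          sgnPair ((PySem.List.pyGet? temperatureB (i - 1)).getD 0) ((PySem.List.pyGet? temperatureB i).getD 0)))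
      = (fun (s : Int × Int) (i : Int) =>
          let a := getTrend ((PySem.List.pyGet? temperatureA (i - 1)).getD 0) ((PySem.List.pyGet? temperatureA i).getD 0)
          let b := getTrend ((PySem.List.pyGet? temperatureB (i - 1)).getD 0) ((PySem.List.pyGet? temperatureB i).getD 0)
          if a = b then (max s.1 (s.2 + 1), s.2 + 1) else (s.1, 0)) := by
    funext s i
    simp only [stepB, getTrend_eq_sgnPair, beq_iff_eq]
  rw [hb]

-- ===== VERDICT (by name: the statement is the Claim_ definition above) =====
theorem temperatureTrend_spec : Claim_equal_temperatureTrend := by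
  intro temperatureA temperatureB _ _
  unfold Spec_temperatureTrend temperatureTrend_alt
  rw [foldl_body_eq]
  rw [foldl_stepB_eq _ 0 0 (le_refl 0) (le_refl 0)]
  obtain ⟨h, t, hr, hh⟩ := splitRuns_shape (matchesOf temperatureA temperatureB)
  rw [hr]
  show max 0 (List.foldl max 0 ((h + 0) :: t)) = List.foldl max 0 (h :: t)
  have h3 : h + 0 = h := by ring
  rw [h3]
  have h4 : (0 : Int) ≤ List.foldl max 0 (h :: t) :=
    le_foldl_max (h :: t) 0
  exact max_eq_right h4
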